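-- pv_equiv track=rewrite | github.com/MustySix66/SlothBytesChallenges | pigLatin.py | sentencePig
-- ===== SOURCE A (Python) =====
-- def sentencePig(sentence):
--     vowels = "aeiou"
--     words = sentence.split()
--     pigWords = []
--
--     for word in words:
--         if word[0] in vowels:
--             pigWords.append(word + "way")
--         else:
--             # Find the index of the first vowel
--             for i in range(len(word)):
--                 if word[i] in vowels:
--                     pigWords.append(word[i:] + word[:i] + "ay")
--                     break
--             else:
--                 pigWords.append(word) # Don't know what to do if there's not vowels in the word, so i'll just do this
--     return " ".join(pigWords)
-- ===== SOURCE B (Python) =====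
-- def sentencePig(sentence):
--     def pig(word):
--         rest = word
--         while rest and rest[0] not in "aeiou":
--             rest = rest[1:]
--         prefix = word[:len(word) - len(rest)]
--         if not prefix:
--             return word + "way"
--         if not rest:
--             return word
--         return rest + prefix + "ay"
--     return " ".join(pig(word) for word in sentence.split())
-- ===== Notes on version B (the rewrite author's own statement) =====
-- stated objective: simpler
-- what changed: Each word is split once into its leading consonant cluster and the remainder (a drop-while), then one three-way branch builds the result, replacing A's first-vowel index scan with slice reassembly and the for/else break pattern.
import Mathlib
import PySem

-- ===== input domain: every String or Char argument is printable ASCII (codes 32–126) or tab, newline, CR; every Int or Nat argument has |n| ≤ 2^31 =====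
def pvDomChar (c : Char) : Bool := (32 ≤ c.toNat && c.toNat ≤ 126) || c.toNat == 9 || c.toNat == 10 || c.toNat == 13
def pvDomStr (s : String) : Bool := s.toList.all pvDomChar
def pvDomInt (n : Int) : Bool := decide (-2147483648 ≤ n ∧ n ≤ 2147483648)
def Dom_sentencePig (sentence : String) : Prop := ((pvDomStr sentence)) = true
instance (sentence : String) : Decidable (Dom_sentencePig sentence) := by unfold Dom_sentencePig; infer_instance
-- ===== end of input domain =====

-- B splits each word once into its leading consonant cluster and the remainder and
-- reassembles with one three-way branch, instead of A's first-vowel index scan with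
-- slices and a for/else; objective: simpler.

def pvVowels : List Char := ['a', 'e', 'i', 'o', 'u']

-- ===== PORT A =====

-- the inner 'for i in range(len(word)): … break / else: …'
def pigAInner (word : List Char) : List Int → List Char
  | [] => word                       -- for/else: no vowel found, keep the word
  | i :: is =>
    match PySem.List.pyGet? word i with
    | none => pigAInner word is      -- unreachable: i ∈ range(len(word))
    | some c =>
      if pvVowels.contains c then
        PySem.List.slice word (some i) none ++ PySem.List.slice word none (some i) ++ ['a', 'y']
      else pigAInner word is

def pigAWord (word : List Char) : List Char :=
  match PySem.List.pyGet? word 0 with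
  | none => word                     -- unreachable: split() yields only nonempty words
  | some c =>
    if pvVowels.contains c then word ++ ['w', 'a', 'y']
    else pigAInner word (PySem.List.pyRange 0 word.length 1)

def sentencePig (sentence : String) : String :=
  let words := PySem.Chars.split₀ sentence.toList
  let pigWords := words.foldl (fun acc w => acc ++ [pigAWord w]) []
  String.ofList (PySem.Chars.join [' '] pigWords)

-- ===== PORT B =====

-- 'while rest and rest[0] not in "aeiou": rest = rest[1:]'
def pigBRest : List Char → List Char
  | [] => []
  | c :: cs => if pvVowels.contains c then c :: cs else pigBRest cs

def pigBWord (word : List Char) : List Char :=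
  let rest := pigBRest word
  let pre := word.take (word.length - rest.length)
  if pre = [] then word ++ ['w', 'a', 'y']
  else if rest = [] then word
  else rest ++ pre ++ ['a', 'y']

def sentencePig_alt (sentence : String) : String :=
  String.ofList (PySem.Chars.join [' '] ((PySem.Chars.split₀ sentence.toList).map pigBWord))

-- ===== PRECONDITION & SPEC =====
def Spec_sentencePig (sentence : String) (out : String) : Prop := out = sentencePig_alt sentence
instance (sentence : String) (out : String) : Decidable (Spec_sentencePig sentence out) := by unfold Spec_sentencePig; infer_instance

-- ===== CLAIM (what is proved, stated in full; the proofs are below) =====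
def Claim_equal_sentencePig : Prop := ∀ (sentence : String), Dom_sentencePig sentence → Spec_sentencePig sentence (sentencePig sentence)

-- ===== LEMMAS AND PROOFS =====

theorem pigBRest_length_le (cs : List Char) : (pigBRest cs).length ≤ cs.length := by
  induction cs with
  | nil => simp [pigBRest]
  | cons c cs ih =>
    simp only [pigBRest]
    split
    · simp
    · exact le_trans ih (by simp)

theorem split₀_aux_ne_nil (s cur : List Char) (acc : List (List Char))
    (hacc : ∀ w ∈ acc, w ≠ []) :
    ∀ w ∈ PySem.Chars.split₀.go s cur acc, w ≠ [] := by
  induction s generalizing cur acc with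
  | nil =>
    intro w hw
    simp only [PySem.Chars.split₀.go] at hw
    split at hw
    · exact hacc w (List.mem_reverse.mp hw)
    · rename_i hne
      rcases List.mem_cons.mp (List.mem_reverse.mp hw) with h | h
      · have hcur : cur ≠ [] := by simpa [List.isEmpty_iff] using hne
        subst h
        simpa using hcur
      · exact hacc w h
  | cons c rest ih =>
    intro w hw
    simp only [PySem.Chars.split₀.go] at hw
    split at hw
    · split at hw
      · exact ih [] acc hacc w hw
      · rename_i hne
        refine ih [] _ ?_ w hw
        intro w' hw'
        rcases List.mem_cons.mp hw' with h | h
        · have hcur : cur ≠ [] := by simpa [List.isEmpty_iff] using hne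
          subst h
          simpa using hcur
        · exact hacc w' h
    · exact ih (c :: cur) acc hacc w hw

theorem split₀_words_ne_nil (s : List Char) :
    ∀ w ∈ PySem.Chars.split₀ s, w ≠ [] := by
  intro w hw
  exact split₀_aux_ne_nil s [] [] (by simp) w hw

theorem pigBRest_cons_pos {c : Char} (cs : List Char) (hv : pvVowels.contains c = true) :
    pigBRest (c :: cs) = c :: cs := by
  simp only [pigBRest]
  rw [if_pos hv]

theorem pigBRest_cons_neg {c : Char} (cs : List Char) (hv : ¬ pvVowels.contains c = true) :
    pigBRest (c :: cs) = pigBRest cs := by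
  simp only [pigBRest]
  rw [if_neg hv]

-- A's inner first-vowel scan, started after a scanned-consonant prefix 'pre', computes
-- B's drop-while decomposition of the suffix.
theorem pigAInner_eq (suf : List Char) : ∀ (pre : List Char),
    pigAInner (pre ++ suf) (PySem.List.pyRange pre.length (pre ++ suf).length 1) =
      (if pigBRest suf = [] then pre ++ suf
       else pigBRest suf ++ (pre ++ suf).take ((pre ++ suf).length - (pigBRest suf).length) ++ ['a', 'y']) := by
  induction suf with
  | nil =>
    intro pre
    rw [PySem.List.pyRange_one_eq_nil (by simp)]
    simp [pigAInner, pigBRest]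
  | cons c cs ih =>
    intro pre
    have hlt : (pre.length : Int) < ((pre ++ c :: cs).length : Int) := by
      simp only [List.length_append, List.length_cons]
      push_cast
      omega
    rw [PySem.List.pyRange_one_cons hlt]
    simp only [pigAInner, PySem.List.pyGet?_append_length]
    by_cases hv : pvVowels.contains c = true
    · rw [if_pos hv, pigBRest_cons_pos cs hv]
      rw [PySem.List.slice_from_natCast, PySem.List.slice_to_natCast]
      rw [if_neg (List.cons_ne_nil c cs)]
      have h2 : (pre ++ c :: cs).length - (c :: cs).length = pre.length := by simp
      rw [h2]
      simp
    · rw [if_neg hv, pigBRest_cons_neg cs hv]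
      have hcast : (pre.length : Int) + 1 = ((pre ++ [c]).length : Int) := by simp
      have happ : pre ++ c :: cs = (pre ++ [c]) ++ cs := by simp
      rw [hcast, happ, ih (pre ++ [c])]

theorem pigWord_eq (w : List Char) (hw : w ≠ []) : pigAWord w = pigBWord w := by
  obtain ⟨c, cs, rfl⟩ := List.exists_cons_of_ne_nil hw
  simp only [pigAWord, PySem.List.pyGet?_zero_cons]
  by_cases hv : pvVowels.contains c = true
  · rw [if_pos hv]
    simp only [pigBWord, pigBRest_cons_pos cs hv, Nat.sub_self, List.take_zero]
    simp
  · rw [if_neg hv]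
    have h0 : pigAInner (c :: cs) (PySem.List.pyRange 0 (c :: cs).length 1) =
        (if pigBRest (c :: cs) = [] then c :: cs
         else pigBRest (c :: cs) ++ (c :: cs).take ((c :: cs).length - (pigBRest (c :: cs)).length) ++ ['a', 'y']) := by
      have h := pigAInner_eq (c :: cs) []
      simpa using h
    rw [h0]
    have hlenle : (pigBRest cs).length ≤ cs.length := pigBRest_length_le cs
    have hpre : (c :: cs).take ((c :: cs).length - (pigBRest (c :: cs)).length) ≠ [] := by
      rw [pigBRest_cons_neg cs hv]
      simp only [ne_eq, List.take_eq_nil_iff]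
      push_neg
      constructor
      · simp; omega
      · exact List.cons_ne_nil c cs
    simp only [pigBWord]
    rw [if_neg hpre]

theorem sentencePig_eq (sentence : String) :
    sentencePig sentence = sentencePig_alt sentence := by
  have h : List.map pigAWord (PySem.Chars.split₀ sentence.toList) =
      List.map pigBWord (PySem.Chars.split₀ sentence.toList) :=
    List.map_congr_left (fun w hw => pigWord_eq w (split₀_words_ne_nil _ w hw))
  unfold sentencePig sentencePig_alt
  simp only [PySem.List.foldl_append_singleton_eq_map, List.nil_append, h]

-- ===== VERDICT (by name: the statement is the Claim_ definition above) =====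
theorem sentencePig_spec : Claim_equal_sentencePig := by
  intro sentence _
  unfold Spec_sentencePig
  exact sentencePig_eq sentence
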